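-- pv_equiv track=rewrite | github.com/zerozzl/nlp_cws | utils/dataloader.py | decode_sents
-- ===== SOURCE A (Python) =====
-- def decode_sents(seqs, stags):
--     sents = []
--     for seq, stag in zip(seqs, stags):
--         words = []
--         word = []
--         for c, tag in zip(seq, stag):
--             word.append(c)
--             if tag == 'S' or tag == 'E':
--                 words.append(''.join(word))
--                 word = []
--         words.append(''.join(word))
--         sents.append(words)
--     return sents
-- ===== SOURCE B (Python) =====
-- def _words(pairs):
--     # Build the word list right-to-left: `out` holds the words formed so far,
--     # most recently formed (i.e. leftmost) last; reverse once at the end.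
--     out = ['']
--     for c, tag in reversed(pairs):
--         if tag == 'S' or tag == 'E':
--             out.append(c)
--         else:
--             out[-1] = c + out[-1]
--     out.reverse()
--     return out
--
--
-- def decode_sents(seqs, stags):
--     return [_words(list(zip(seq, stag))) for seq, stag in zip(seqs, stags)]
-- ===== Notes on version B (the rewrite author's own statement) =====
-- stated objective: alternative
-- what changed: A accumulates characters left-to-right and flushes a word on each 'S'/'E' tag; B builds each sentence in a single backward pass, consing a new word on 'S'/'E' and otherwise prepending the character onto the current first word, with one final reverse.
import Mathlib
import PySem

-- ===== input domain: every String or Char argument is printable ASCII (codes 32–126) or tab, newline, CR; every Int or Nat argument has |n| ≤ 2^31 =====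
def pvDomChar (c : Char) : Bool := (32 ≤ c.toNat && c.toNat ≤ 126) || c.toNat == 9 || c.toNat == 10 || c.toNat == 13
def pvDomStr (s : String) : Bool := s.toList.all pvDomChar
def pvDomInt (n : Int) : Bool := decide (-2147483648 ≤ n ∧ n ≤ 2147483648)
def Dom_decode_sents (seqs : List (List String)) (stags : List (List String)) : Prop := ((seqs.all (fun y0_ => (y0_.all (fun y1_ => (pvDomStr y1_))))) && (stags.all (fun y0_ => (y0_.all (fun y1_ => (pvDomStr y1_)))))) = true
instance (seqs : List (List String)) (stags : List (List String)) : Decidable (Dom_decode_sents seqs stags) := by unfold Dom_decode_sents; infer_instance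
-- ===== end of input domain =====

-- B rebuilds each sentence in ONE backward pass (words assembled right-to-left by
-- prepending into the current word) instead of A's forward accumulate-and-flush scan;
-- objective: alternative decomposition, same cost.

-- ===== PORT A =====
-- forward scan: accumulate chars in `word`, flush on 'S'/'E', final trailing flush
def decode_sents (seqs : List (List String)) (stags : List (List String)) : List (List String) :=
  (seqs.zip stags).foldl
    (fun sents p =>
      let r := (p.1.zip p.2).foldl
        (fun (st : List String × List String) ct =>
          let word := st.2 ++ [ct.1]
          if ct.2 == "S" || ct.2 == "E" then (st.1 ++ [String.join word], ([] : List String))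
          else (st.1, word))
        (([] : List String), ([] : List String))
      sents ++ [r.1 ++ [String.join r.2]])
    []

-- ===== PORT B =====
-- Source B's _words: one pass over reversed(pairs). Python's `out` (most recent word LAST,
-- reversed once at the end) is kept here head-first, so Python append = cons,
-- Python out[-1] update = head update, and the final out.reverse() is the identity.
def wordsAlt (pairs : List (String × String)) : List String :=
  pairs.reverse.foldl
    (fun out ct =>
      if ct.2 == "S" || ct.2 == "E" then ct.1 :: out
      else match out with
        | [] => [ct.1]           -- unreachable: out starts (and stays) nonempty
        | w :: ws => (ct.1 ++ w) :: ws)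
    [""]

def decode_sents_alt (seqs : List (List String)) (stags : List (List String)) : List (List String) :=
  (seqs.zip stags).map (fun p => wordsAlt (p.1.zip p.2))

-- ===== PRECONDITION & SPEC =====
def Spec_decode_sents (seqs : List (List String)) (stags : List (List String)) (out : List (List String)) : Prop := out = decode_sents_alt seqs stags
instance (seqs : List (List String)) (stags : List (List String)) (out : List (List String)) : Decidable (Spec_decode_sents seqs stags out) := by unfold Spec_decode_sents; infer_instance

-- ===== CLAIM (what is proved, stated in full; the proofs are below) =====
def Claim_equal_decode_sents : Prop := ∀ (seqs : List (List String)) (stags : List (List String)), Dom_decode_sents seqs stags → Spec_decode_sents seqs stags (decode_sents seqs stags)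

-- ===== LEMMAS AND PROOFS =====

-- named copies of A's two step functions (definitionally the ones in the port)
def stepA (st : List String × List String) (ct : String × String) : List String × List String :=
  let word := st.2 ++ [ct.1]
  if ct.2 == "S" || ct.2 == "E" then (st.1 ++ [String.join word], ([] : List String))
  else (st.1, word)

def innerA (pairs : List (String × String)) : List String :=
  let r := pairs.foldl stepA (([] : List String), ([] : List String))
  r.1 ++ [String.join r.2]

theorem decode_sents_eq (seqs stags : List (List String)) :
    decode_sents seqs stags
      = (seqs.zip stags).foldl (fun sents p => sents ++ [innerA (p.1.zip p.2)]) [] := rfl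

-- B's fold, in foldr form (B runs it as a foldl over the reversed pairs)
def stepB (ct : String × String) (out : List String) : List String :=
  if ct.2 == "S" || ct.2 == "E" then ct.1 :: out
  else match out with
    | [] => [ct.1]
    | w :: ws => (ct.1 ++ w) :: ws

theorem wordsAlt_eq_foldr (pairs : List (String × String)) :
    wordsAlt pairs = pairs.foldr stepB [""] := by
  rw [wordsAlt, List.foldl_reverse]; rfl

theorem stepB_ne_nil (ct : String × String) (out : List String) : stepB ct out ≠ [] := by
  unfold stepB
  split
  · simp
  · cases out <;> simp

theorem foldrB_ne_nil (pairs : List (String × String)) : pairs.foldr stepB [""] ≠ [] := by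
  cases pairs with
  | nil => simp
  | cons a l => exact stepB_ne_nil _ _

-- prepend a string onto the first word of a word list
def mergeHead (s : String) : List String → List String
  | [] => [s]
  | w :: ws => (s ++ w) :: ws

-- the core invariant: A's inner scan from any state (words, word) equals
-- words ++ (join word merged onto the front of B's answer for the rest)
theorem inner_eq (pairs : List (String × String)) :
    ∀ (words word : List String),
      (pairs.foldl stepA (words, word)).1 ++ [String.join (pairs.foldl stepA (words, word)).2]
      = words ++ mergeHead (String.join word) (pairs.foldr stepB [""]) := by
  induction pairs with
  | nil =>
    intro words word
    simp [mergeHead]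
  | cons ct rest ih =>
    intro words word
    simp only [List.foldl_cons, List.foldr_cons]
    have hne := foldrB_ne_nil rest
    by_cases h : (ct.2 == "S" || ct.2 == "E") = true
    · rw [show stepA (words, word) ct = (words ++ [String.join (word ++ [ct.1])], ([] : List String)) by
        simp [stepA, h]]
      rw [ih]
      cases hB : rest.foldr stepB [""] with
      | nil => exact absurd hB hne
      | cons w ws =>
        simp [stepB, h, mergeHead, String.join]
    · rw [show stepA (words, word) ct = (words, word ++ [ct.1]) by simp [stepA, h]]
      rw [ih]
      cases hB : rest.foldr stepB [""] with
      | nil => exact absurd hB hne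
      | cons w ws =>
        simp [stepB, h, mergeHead, String.join, String.append_assoc]

theorem inner_eq' (pairs : List (String × String)) : innerA pairs = wordsAlt pairs := by
  have h := inner_eq pairs [] []
  rw [wordsAlt_eq_foldr, innerA]
  cases hB : pairs.foldr stepB [""] with
  | nil => exact absurd hB (foldrB_ne_nil pairs)
  | cons w ws => rw [hB] at h; simpa [mergeHead, String.join] using h

theorem outer_eq (l : List (List String × List String)) :
    ∀ (acc : List (List String)),
      l.foldl (fun sents p => sents ++ [innerA (p.1.zip p.2)]) acc
      = acc ++ l.map (fun p => wordsAlt (p.1.zip p.2)) := by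
  induction l with
  | nil => intro acc; simp
  | cons p rest ih =>
    intro acc
    simp only [List.foldl_cons, List.map_cons]
    rw [ih, inner_eq' (p.1.zip p.2)]
    simp

-- ===== VERDICT (by name: the statement is the Claim_ definition above) =====
theorem decode_sents_spec : Claim_equal_decode_sents := by
  intro seqs stags _
  unfold Spec_decode_sents decode_sents_alt
  rw [decode_sents_eq]
  simpa using outer_eq (seqs.zip stags) []
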